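-- pv_equiv track=rewrite | github.com/BMPixel/MMCoT | models/model_engine.py | cut_seq
-- ===== SOURCE A (Python) =====
-- def cut_seq(seq, by=["Q:"]):
--     min_idx = len(seq)
--     for b in by:
--         idx = seq.find(b)
--         if idx != -1:
--             min_idx = min(min_idx, idx)
--     if min_idx == -1:
--         return seq
--     return seq[:min_idx]
-- ===== SOURCE B (Python) =====
-- def cut_seq(seq, by=["Q:"]):
--     # single left-to-right position scan: cut at the first position where any separator starts
--     for i in range(len(seq) + 1):
--         for b in by:
--             if seq.startswith(b, i):
--                 return seq[:i]
--     return seq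
-- ===== Notes on version B (the rewrite author's own statement) =====
-- stated objective: faster
-- what changed: B replaces A's per-separator full str.find scans with running-minimum tracking by a single left-to-right scan over positions that returns at the first position where any separator starts.
import Mathlib
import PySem

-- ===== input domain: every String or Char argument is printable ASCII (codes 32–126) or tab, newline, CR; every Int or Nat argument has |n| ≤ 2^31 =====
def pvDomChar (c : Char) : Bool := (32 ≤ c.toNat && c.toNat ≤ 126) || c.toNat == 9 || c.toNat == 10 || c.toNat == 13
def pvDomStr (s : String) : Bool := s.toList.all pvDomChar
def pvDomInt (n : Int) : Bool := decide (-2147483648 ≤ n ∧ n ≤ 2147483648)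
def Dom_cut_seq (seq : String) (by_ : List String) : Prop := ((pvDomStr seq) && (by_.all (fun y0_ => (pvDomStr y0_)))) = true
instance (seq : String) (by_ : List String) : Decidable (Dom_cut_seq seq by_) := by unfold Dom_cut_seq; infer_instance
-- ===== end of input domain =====

-- B replaces A's per-separator find scans with min-tracking by a single left-to-right
-- position scan that returns at the first position where any separator starts (alternative decomposition).

-- ===== PORT A =====
def cut_seq (seq : String) (by_ : List String) : String :=
  let min_idx : Int :=
    by_.foldl (fun m b =>
      let idx := PySem.Str.find seq b
      if idx ≠ -1 then min m idx else m) ((seq.toList.length : Int))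
  if min_idx = -1 then seq
  else PySem.Str.slice seq none (some min_idx)

-- ===== PORT B =====
-- the 'for i in range(len(seq)+1): for b in by: if seq.startswith(b, i): return seq[:i]' loop;
-- 'seq.startswith(b, i)' with 0 ≤ i ≤ len(seq) is exactly 'seq[i:].startswith(b)', ported as
-- PySem.Chars.startswith on the dropped list.
def cutScan (s : List Char) (by_ : List String) : List Nat → Option Nat
  | [] => none
  | i :: rest =>
    if by_.any (fun b => PySem.Chars.startswith (s.drop i) b.toList)
    then some i
    else cutScan s by_ rest

def cut_seq_alt (seq : String) (by_ : List String) : String :=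
  match cutScan seq.toList by_ (List.range (seq.toList.length + 1)) with
  | some i => String.ofList (seq.toList.take i)
  | none => seq

-- ===== PRECONDITION & SPEC =====
def Spec_cut_seq (seq : String) (by_ : List String) (out : String) : Prop := out = cut_seq_alt seq by_
instance (seq : String) (by_ : List String) (out : String) : Decidable (Spec_cut_seq seq by_ out) := by unfold Spec_cut_seq; infer_instance

-- ===== CLAIM (what is proved, stated in full; the proofs are below) =====
def Claim_equal_cut_seq : Prop := ∀ (seq : String) (by_ : List String), Dom_cut_seq seq by_ → Spec_cut_seq seq by_ (cut_seq seq by_)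

-- ===== LEMMAS AND PROOFS =====

-- A's fold: the result is ≤ the init, ≤ every found find-index, and is the init or an attained find-index.
theorem cutFold_inv (seq : String) (by_ : List String) (init : Int) :
    (by_.foldl (fun m b =>
      let idx := PySem.Str.find seq b
      if idx ≠ -1 then min m idx else m) init) ≤ init ∧
    (∀ b ∈ by_, PySem.Str.find seq b ≠ -1 →
      (by_.foldl (fun m b =>
        let idx := PySem.Str.find seq b
        if idx ≠ -1 then min m idx else m) init) ≤ PySem.Str.find seq b) ∧
    ((by_.foldl (fun m b =>
        let idx := PySem.Str.find seq b
        if idx ≠ -1 then min m idx else m) init) = init ∨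
      ∃ b ∈ by_, PySem.Str.find seq b ≠ -1 ∧
        (by_.foldl (fun m b =>
          let idx := PySem.Str.find seq b
          if idx ≠ -1 then min m idx else m) init) = PySem.Str.find seq b) := by
  induction by_ generalizing init with
  | nil => simp
  | cons b rest ih =>
    simp only [List.foldl_cons]
    by_cases hb : PySem.Str.find seq b ≠ -1
    · simp only [if_pos hb]
      obtain ⟨h1, h2, h3⟩ := ih (min init (PySem.Str.find seq b))
      refine ⟨le_trans h1 (min_le_left _ _), ?_, ?_⟩
      · intro c hc hcf
        rcases List.mem_cons.mp hc with hc | hc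
        · rw [hc]; exact le_trans h1 (min_le_right _ _)
        · exact h2 c hc hcf
      · rcases h3 with h3 | ⟨c, hc, hcf, hval⟩
        · rcases le_total init (PySem.Str.find seq b) with h | h
          · exact Or.inl (by rw [h3]; exact min_eq_left h)
          · exact Or.inr ⟨b, List.mem_cons_self, hb, by rw [h3]; exact min_eq_right h⟩
        · exact Or.inr ⟨c, List.mem_cons_of_mem _ hc, hcf, hval⟩
    · simp only [if_neg hb]
      obtain ⟨h1, h2, h3⟩ := ih init
      refine ⟨h1, ?_, ?_⟩
      · intro c hc hcf
        rcases List.mem_cons.mp hc with hc | hc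
        · exact absurd hcf (hc ▸ hb)
        · exact h2 c hc hcf
      · rcases h3 with h3 | ⟨c, hc, hcf, hval⟩
        · exact Or.inl h3
        · exact Or.inr ⟨c, List.mem_cons_of_mem _ hc, hcf, hval⟩

theorem cutScan_append (s : List Char) (by_ : List String) (l₁ l₂ : List Nat) :
    cutScan s by_ (l₁ ++ l₂) = Option.or (cutScan s by_ l₁) (cutScan s by_ l₂) := by
  induction l₁ with
  | nil => simp [cutScan]
  | cons i rest ih =>
    simp only [List.cons_append, cutScan]
    split_ifs with h
    · rfl
    · exact ih

theorem cutScan_range_none (s : List Char) (by_ : List String) (m : Nat) :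
    cutScan s by_ (List.range m) = none ↔
      ∀ j < m, (by_.any (fun b => PySem.Chars.startswith (s.drop j) b.toList)) = false := by
  induction m with
  | zero => simp [cutScan]
  | succ m ih =>
    rw [List.range_succ, cutScan_append, Option.or_eq_none_iff]
    constructor
    · rintro ⟨h1, h2⟩ j hj
      rcases Nat.lt_succ_iff_lt_or_eq.mp hj with hj | rfl
      · exact ih.mp h1 j hj
      · by_contra hp
        simp only [Bool.not_eq_false] at hp
        simp [cutScan, hp] at h2
    · intro h
      exact ⟨ih.mpr (fun j hj => h j (Nat.lt_succ_of_lt hj)),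
        by simp [cutScan, h m (Nat.lt_succ_self m)]⟩

theorem cutScan_range_some (s : List Char) (by_ : List String) (m i : Nat)
    (h : cutScan s by_ (List.range m) = some i) :
    i < m ∧ (by_.any (fun b => PySem.Chars.startswith (s.drop i) b.toList)) = true ∧
      ∀ j < i, (by_.any (fun b => PySem.Chars.startswith (s.drop j) b.toList)) = false := by
  induction m with
  | zero => simp [cutScan] at h
  | succ m ih =>
    rw [List.range_succ, cutScan_append] at h
    cases hfst : cutScan s by_ (List.range m) with
    | some i' =>
      rw [hfst] at h
      simp only [Option.or] at h
      obtain rfl : i' = i := by injection h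
      obtain ⟨h1, h2, h3⟩ := ih hfst
      exact ⟨Nat.lt_succ_of_lt h1, h2, h3⟩
    | none =>
      rw [hfst] at h
      simp only [Option.or, cutScan] at h
      split_ifs at h with hp
      · obtain rfl : m = i := by injection h
        exact ⟨Nat.lt_succ_self _, hp, (cutScan_range_none s by_ m).mp hfst⟩

-- a match at position i ≤ len gives a found separator whose first occurrence is ≤ i
theorem match_gives_find (s : List Char) (by_ : List String) (i : Nat) (_hi : i ≤ s.length)
    (hp : (by_.any (fun b => PySem.Chars.startswith (s.drop i) b.toList)) = true) :
    ∃ b ∈ by_, PySem.Chars.find s b.toList ≠ -1 ∧ (PySem.Chars.find s b.toList).toNat ≤ i := by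
  rcases List.any_eq_true.mp hp with ⟨b, hb, hsw⟩
  have hpre : b.toList <+: s.drop i := (PySem.Chars.startswith_iff _ _).mp hsw
  have hinf : b.toList <:+: s := hpre.isInfix.trans (s.drop_suffix i).isInfix
  have hne : PySem.Chars.find s b.toList ≠ -1 := (PySem.Chars.find_ne_neg_one_iff s b.toList).mpr hinf
  have hnn : 0 ≤ PySem.Chars.find s b.toList := by
    have := PySem.Chars.neg_one_le_find s b.toList; omega
  obtain ⟨-, hmin⟩ := PySem.Chars.find_spec hnn
  refine ⟨b, hb, hne, ?_⟩
  by_contra hlt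
  exact hmin i (by omega) hpre

-- a found separator gives a match at its first-occurrence position (which is ≤ len)
theorem find_gives_match (s : List Char) (by_ : List String) (b : String) (hb : b ∈ by_)
    (hne : PySem.Chars.find s b.toList ≠ -1) :
    (PySem.Chars.find s b.toList).toNat ≤ s.length ∧
      (by_.any (fun c => PySem.Chars.startswith
        (s.drop (PySem.Chars.find s b.toList).toNat) c.toList)) = true := by
  have hnn : 0 ≤ PySem.Chars.find s b.toList := by
    have := PySem.Chars.neg_one_le_find s b.toList; omega
  obtain ⟨hpre, -⟩ := PySem.Chars.find_spec hnn
  have hle := PySem.Chars.find_le_length s b.toList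
  refine ⟨by omega, List.any_eq_true.mpr ⟨b, hb, (PySem.Chars.startswith_iff _ _).mpr hpre⟩⟩

-- ===== VERDICT (by name: the statement is the Claim_ definition above) =====
theorem cut_seq_spec : Claim_equal_cut_seq := by
  intro seq by_ _
  unfold Spec_cut_seq cut_seq cut_seq_alt
  set s := seq.toList with hs
  set m : Int := by_.foldl (fun m b =>
      let idx := PySem.Str.find seq b
      if idx ≠ -1 then min m idx else m) ((s.length : Int)) with hm
  obtain ⟨h1, h2, h3⟩ := cutFold_inv seq by_ ((s.length : Int))
  rw [← hm] at h1 h2 h3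
  have hfind : ∀ b : String, PySem.Str.find seq b = PySem.Chars.find s b.toList := by
    intro b; simp [PySem.Str.find_eq, hs]
  have hmnn : 0 ≤ m := by
    rcases h3 with h3 | ⟨b, _, hbf, hval⟩
    · rw [h3]; exact Int.natCast_nonneg _
    · rw [hfind] at hbf
      have := PySem.Chars.neg_one_le_find s b.toList
      rw [hval, hfind]; omega
  have hmne : ¬ m = -1 := by omega
  rw [if_neg hmne]
  cases hscan : cutScan s by_ (List.range (s.length + 1)) with
  | some i =>
    obtain ⟨hlt, hp, hfirst⟩ := cutScan_range_some s by_ _ i hscan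
    have hile : i ≤ s.length := by omega
    -- m ≤ i
    obtain ⟨b, hb, hbf, hbfle⟩ := match_gives_find s by_ i hile hp
    have hmb := h2 b hb (by rw [hfind]; exact hbf)
    rw [hfind] at hmb
    have hbnn : 0 ≤ PySem.Chars.find s b.toList := by
      have := PySem.Chars.neg_one_le_find s b.toList; omega
    have hmi : m ≤ (i : Int) := le_trans hmb (by omega)
    -- i ≤ m
    have him : (i : Int) ≤ m := by
      rcases h3 with h3 | ⟨c, hc, hcf, hval⟩
      · rw [h3]; exact_mod_cast hile
      · rw [hfind] at hcf hval
        obtain ⟨-, hmatch⟩ := find_gives_match s by_ c hc hcf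
        by_contra hlt'
        have hmlt : m.toNat < i := by omega
        have := hfirst m.toNat hmlt
        rw [hval] at this
        simp [this] at hmatch
    have hmeq : m = (i : Int) := le_antisymm hmi him
    apply String.toList_inj.mp
    rw [PySem.Str.toList_slice, PySem.Chars.slice_eq_listSlice]
    simp only [← hs]
    rw [PySem.List.slice_to s (by omega : (0:Int) ≤ m), hmeq]
    simp
  | none =>
    have hnone := (cutScan_range_none s by_ (s.length + 1)).mp hscan
    have hmlen : m = (s.length : Int) := by
      rcases h3 with h3 | ⟨b, hb, hbf, hval⟩
      · exact h3
      · rw [hfind] at hbf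
        obtain ⟨hle, hmatch⟩ := find_gives_match s by_ b hb hbf
        have := hnone (PySem.Chars.find s b.toList).toNat (by omega)
        simp [hmatch] at this
    apply String.toList_inj.mp
    rw [PySem.Str.toList_slice, PySem.Chars.slice_eq_listSlice]
    simp only [← hs]
    rw [PySem.List.slice_to s (by omega : (0:Int) ≤ m), hmlen]
    simp
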